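-- pv_equiv track=rewrite | github.com/KDYeon326/algorithm_course_in_ss_afy | baekjoon/baekjoon_2176합리적인이동경로.py | dfs
-- ===== SOURCE A (Python) =====
-- def dfs(node, graph, dist, dp):
--
--     if node == 2:
--         return 1
--
--     if dp[node] != -1:
--         return dp[node]
--
--     dp[node] = 0
--
--     for nxt, _ in graph[node]:
--
--         if dist[node] > dist[nxt]:
--             dp[node] += dfs(nxt, graph, dist, dp)
--
--     return dp[node]
-- ===== SOURCE B (Python) =====
-- # Iterative post-order DFS with an explicit stack instead of recursion.
-- # Same return value and the same dp writes as the recursive version: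
-- # a node's dp entry is summed once, after all its qualifying successors
-- # have been processed (memoized via dp[n] != -1; dp[2] is never written).
-- def dfs(node, graph, dist, dp):
--     if node == 2:
--         return 1
--     stack = [(node, False)]
--     while stack:
--         n, ready = stack.pop()
--         if ready:
--             total = 0
--             for nxt, _ in graph[n]:
--                 if dist[n] > dist[nxt]:
--                     total += 1 if nxt == 2 else dp[nxt]
--             dp[n] = total
--         elif n != 2 and dp[n] == -1:
--             stack.append((n, True))
--             for nxt, _ in reversed(graph[n]):
--                 if dist[n] > dist[nxt]:
--                     stack.append((nxt, False))
--     return dp[node]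
-- ===== Notes on version B (the rewrite author's own statement) =====
-- stated objective: alternative
-- what changed: Replaces the recursive memoized DFS with an iterative post-order DFS over an explicit stack: each node is pushed, its qualifying successors are fully processed first, and its dp entry is then filled by one summation pass; memoization (dp[n] != -1) and the dp writes are identical, so return value and mutation match A.
-- outside the precondition, e.g. on dfs(0, [[], [(5, 0)]], [0, 0], [-1, -1]): A returns 0, B returns 0; on dfs(0, [[(1, 0)], []], [1, 0], [-1, -5]): A returns -5, B returns -5
import Mathlib
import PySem

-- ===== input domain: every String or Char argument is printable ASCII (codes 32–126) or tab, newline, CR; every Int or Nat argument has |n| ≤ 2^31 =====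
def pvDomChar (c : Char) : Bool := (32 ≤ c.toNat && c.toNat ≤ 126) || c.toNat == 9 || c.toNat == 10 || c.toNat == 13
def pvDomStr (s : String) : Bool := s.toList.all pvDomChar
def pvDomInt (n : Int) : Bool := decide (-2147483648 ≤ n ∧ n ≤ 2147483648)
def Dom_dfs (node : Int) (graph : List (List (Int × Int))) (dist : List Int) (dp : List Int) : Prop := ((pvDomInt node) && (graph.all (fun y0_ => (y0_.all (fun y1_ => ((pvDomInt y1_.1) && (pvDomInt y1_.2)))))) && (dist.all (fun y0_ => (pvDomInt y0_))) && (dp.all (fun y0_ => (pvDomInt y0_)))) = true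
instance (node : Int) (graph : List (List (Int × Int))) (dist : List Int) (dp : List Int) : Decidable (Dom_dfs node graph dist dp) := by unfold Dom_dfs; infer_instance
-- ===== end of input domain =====

-- B replaces A's recursive memoized DFS by an iterative post-order DFS on an explicit
-- stack (same return value; A and B mutate dp identically in Python — the theorems here
-- are about the return value; both ports thread dp functionally).

-- ===== PORT A =====
-- the 'for nxt, _ in graph[node]' loop of A; 'rec' is the recursive call dfs(nxt, ...)
def loopA (dist : List Int) (rec : Int → List Int → Option (Int × List Int)) (n : Int) :
    List (Int × Int) → List Int → Option (List Int)
  | [], dp => some dp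
  | e :: t, dp =>
    match PySem.List.pyGet? dist n, PySem.List.pyGet? dist e.1 with
    | some dn, some dnxt =>
      if dn > dnxt then
        match rec e.1 dp with
        | none => none
        | some (v, dp') =>
          match PySem.List.pyGet? dp' n with
          | none => none
          | some cur =>
            match PySem.List.pySet? dp' n (cur + v) with
            | none => none
            | some dp'' => loopA dist rec n t dp''
      else loopA dist rec n t dp
    | _, _ => none

-- A's recursion, totalised with fuel (fuel dist.length+1 is proved sufficient below;
-- Python raises exactly where a PySem primitive yields none, excluded by Pre_)
def recA (graph : List (List (Int × Int))) (dist : List Int) :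
    Nat → Int → List Int → Option (Int × List Int)
  | 0, _, _ => none
  | f + 1, node, dp =>
    if node = 2 then some (1, dp)
    else
      match PySem.List.pyGet? dp node with
      | none => none
      | some v =>
        if v ≠ -1 then some (v, dp)
        else
          match PySem.List.pySet? dp node 0 with
          | none => none
          | some dpz =>
            match PySem.List.pyGet? graph node with
            | none => none
            | some adj =>
              match loopA dist (fun c s => recA graph dist f c s) node adj dpz with
              | none => none
              | some dp2 =>
                match PySem.List.pyGet? dp2 node with
                | none => none
                | some r => some (r, dp2)

def dfs (node : Int) (graph : List (List (Int × Int))) (dist : List Int) (dp : List Int) : Int :=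
  match recA graph dist (dist.length + 1) node dp with
  | some (v, _) => v
  | none => 0

-- ===== PORT B =====
-- 'total += 1 if nxt == 2 else dp[nxt]' summation of Source B's ready branch
def sumQ (dist dp : List Int) (n : Int) : List (Int × Int) → Int → Option Int
  | [], acc => some acc
  | e :: t, acc =>
    match PySem.List.pyGet? dist n, PySem.List.pyGet? dist e.1 with
    | some dn, some dnxt =>
      if dn > dnxt then
        if e.1 = 2 then sumQ dist dp n t (acc + 1)
        else
          match PySem.List.pyGet? dp e.1 with
          | none => none
          | some w => sumQ dist dp n t (acc + w)
      else sumQ dist dp n t acc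
    | _, _ => none

-- the qualifying successors pushed by Source B (pushed reversed, so popped in adj order:
-- head of the result is the top of the stack)
def pushQ (dist : List Int) (n : Int) : List (Int × Int) → Option (List (Int × Bool))
  | [] => some []
  | e :: t =>
    match PySem.List.pyGet? dist n, PySem.List.pyGet? dist e.1 with
    | some dn, some dnxt =>
      match pushQ dist n t with
      | none => none
      | some qs => some (if dn > dnxt then (e.1, false) :: qs else qs)
    | _, _ => none

-- Source B's while loop, totalised with fuel (head of the list = top of the stack)
def runB (graph : List (List (Int × Int))) (dist : List Int) :
    Nat → List (Int × Bool) → List Int → Option (List Int)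
  | 0, _, _ => none
  | _ + 1, [], dp => some dp
  | f + 1, (n, ready) :: rest, dp =>
    if ready then
      match PySem.List.pyGet? graph n with
      | none => none
      | some adj =>
        match sumQ dist dp n adj 0 with
        | none => none
        | some total =>
          match PySem.List.pySet? dp n total with
          | none => none
          | some dp' => runB graph dist f rest dp'
    else
      if n = 2 then runB graph dist f rest dp
      else
        match PySem.List.pyGet? dp n with
        | none => none
        | some v =>
          if v = -1 then
            match PySem.List.pyGet? graph n with
            | none => none
            | some adj =>
              match pushQ dist n adj with
              | none => none
              | some qs => runB graph dist f (qs ++ (n, true) :: rest) dp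
          else runB graph dist f rest dp

-- fuel bound for runB, proved sufficient below (W bounds every adjacency length)
def costB (W : Nat) : Nat → Nat
  | 0 => 1
  | f + 1 => 2 + W * costB W f

def dfs_alt (node : Int) (graph : List (List (Int × Int))) (dist : List Int) (dp : List Int) : Int :=
  if node = 2 then 1
  else
    match runB graph dist (1 + costB graph.flatten.length (dist.length + 1)) [(node, false)] dp with
    | some dpf => (PySem.List.pyGet? dpf node).getD 0
    | none => 0

-- ===== PRECONDITION & SPEC =====
-- Pre_ admits: the base case node 2; an immediate memo hit (dp[node] exists and is
-- not -1 — A returns it reading nothing else); and the natural domain of this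
-- memoized DFS: well-formed instances (graph/dist/dp of equal length, the start node
-- and every edge target an in-range index — A raises IndexError when an out-of-range
-- index is reached) whose dp memo entries are -1 (uncomputed) or ≥ 0 (a path count).
-- dp entries below -1 are outside the memo table's meaning and unreachable
-- out-of-range edges are excluded only to keep the condition closed-form — on
-- excluded inputs where A returns, B returns the same value (see the cites).
def Pre_dfs (node : Int) (graph : List (List (Int × Int))) (dist : List Int) (dp : List Int) : Prop :=
  node = 2 ∨
  (PySem.List.pyGet? dp node ≠ none ∧ PySem.List.pyGet? dp node ≠ some (-1)) ∨
    ((∀ v ∈ dp, -1 ≤ v) ∧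
     graph.length = dist.length ∧ dp.length = dist.length ∧
     PySem.Raise.InRange dist.length node ∧
     ∀ adj ∈ graph, ∀ e ∈ adj, PySem.Raise.InRange dist.length e.1)

instance (node : Int) (graph : List (List (Int × Int))) (dist : List Int) (dp : List Int) : Decidable (Pre_dfs node graph dist dp) := by
  unfold Pre_dfs PySem.Raise.InRange; infer_instance

def pvWitness_dfs : Int × (List (List (Int × Int))) × List Int × List Int :=
  (0, [[(1, 0)], []], [1, 0], [-1, -1])

def Spec_dfs (node : Int) (graph : List (List (Int × Int))) (dist : List Int) (dp : List Int) (out : Int) : Prop := out = dfs_alt node graph dist dp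
instance (node : Int) (graph : List (List (Int × Int))) (dist : List Int) (dp : List Int) (out : Int) : Decidable (Spec_dfs node graph dist dp out) := by unfold Spec_dfs; infer_instance

-- ===== CLAIM (what is proved, stated in full; the proofs are below) =====
def Claim_equal_dfs : Prop := ∀ (node : Int) (graph : List (List (Int × Int))) (dist : List Int) (dp : List Int), Dom_dfs node graph dist dp → Pre_dfs node graph dist dp → Spec_dfs node graph dist dp (dfs node graph dist dp)

-- ===== LEMMAS AND PROOFS =====

-- ---- basic index/list facts ----
theorem pyIdx?_lt {n : Nat} {i : Int} {k : Nat} (h : PySem.List.pyIdx? n i = some k) : k < n := by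
  unfold PySem.List.pyIdx? at h
  split_ifs at h <;> simp_all <;> omega

theorem pyGet?_some_getD {α : Type} (a0 : α) {xs : List α} {i : Int} {k : Nat}
    (h : PySem.List.pyIdx? xs.length i = some k) :
    PySem.List.pyGet? xs i = some (xs.getD k a0) := by
  have hk := pyIdx?_lt h
  simp [PySem.List.pyGet?, h, List.getElem?_eq_getElem, hk, List.getD_eq_getElem?_getD]

theorem pyGet?_some_inv {α : Type} (a0 : α) {xs : List α} {i : Int} {w : α}
    (h : PySem.List.pyGet? xs i = some w) :
    ∃ k, PySem.List.pyIdx? xs.length i = some k ∧ k < xs.length ∧ w = xs.getD k a0 := by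
  unfold PySem.List.pyGet? at h
  cases hidx : PySem.List.pyIdx? xs.length i with
  | none => simp [hidx] at h
  | some k =>
    have hk := pyIdx?_lt hidx
    refine ⟨k, rfl, hk, ?_⟩
    rw [hidx] at h
    simp only [Option.bind_some] at h
    simp [List.getD_eq_getElem?_getD, h]

theorem pySet?_some {α : Type} {xs : List α} {i : Int} {k : Nat} (v : α)
    (h : PySem.List.pyIdx? xs.length i = some k) :
    PySem.List.pySet? xs i v = some (xs.set k v) := by
  simp [PySem.List.pySet?, h]

theorem pySet?_some_inv {α : Type} {xs ys : List α} {i : Int} {v : α}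
    (h : PySem.List.pySet? xs i v = some ys) :
    ∃ k, PySem.List.pyIdx? xs.length i = some k ∧ k < xs.length ∧ ys = xs.set k v := by
  unfold PySem.List.pySet? at h
  cases hidx : PySem.List.pyIdx? xs.length i with
  | none => simp [hidx] at h
  | some k =>
    have hk := pyIdx?_lt hidx
    simp [hidx] at h
    exact ⟨k, rfl, hk, h.symm⟩

theorem getD_set_self {xs : List Int} {j : Nat} (v : Int) (h : j < xs.length) :
    (xs.set j v).getD j 0 = v := by
  simp [List.getD_eq_getElem?_getD, List.getElem?_set, h]

theorem getD_set_ne {xs : List Int} {j k : Nat} (v : Int) (h : k ≠ j) :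
    (xs.set j v).getD k 0 = xs.getD k 0 := by
  simp [List.getD_eq_getElem?_getD, List.getElem?_set, (Ne.symm h)]

theorem getD_mem {xs : List Int} {k : Nat} (h : k < xs.length) : xs.getD k 0 ∈ xs := by
  simp [List.getD_eq_getElem?_getD, List.getElem?_eq_getElem, h]

theorem eq_of_getD {a b : List Int} (hl : a.length = b.length)
    (h : ∀ k, k < a.length → a.getD k 0 = b.getD k 0) : a = b := by
  apply List.ext_getElem hl
  intro k hk hk'
  have := h k hk
  simpa [List.getD_eq_getElem?_getD, List.getElem?_eq_getElem, hk, hk'] using this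

-- ---- patching: the machine state during the simulation ----
def patchE (E : List Nat) (a b : List Int) : List Int :=
  (List.range a.length).map (fun k => if k ∈ E then b.getD k 0 else a.getD k 0)

theorem length_patchE (E : List Nat) (a b : List Int) : (patchE E a b).length = a.length := by
  simp [patchE]

theorem getD_patchE (E : List Nat) (a b : List Int) {k : Nat} (hk : k < a.length) :
    (patchE E a b).getD k 0 = if k ∈ E then b.getD k 0 else a.getD k 0 := by
  simp [patchE, List.getD_eq_getElem?_getD, List.getElem?_map, List.getElem?_range, hk]

theorem patchE_nil (a b : List Int) : patchE [] a b = a := by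
  apply eq_of_getD (by simp [length_patchE])
  intro k hk
  rw [length_patchE] at hk
  rw [getD_patchE [] a b hk]
  simp


theorem patchE_ext {E : List Nat} {a a' b : List Int} (hl : a.length = a'.length)
    (h : ∀ k, k < a.length → k ∉ E → a.getD k 0 = a'.getD k 0) :
    patchE E a b = patchE E a' b := by
  apply eq_of_getD (by simp [length_patchE, hl])
  intro k hk
  rw [length_patchE] at hk
  rw [getD_patchE E a b hk, getD_patchE E a' b (by omega)]
  by_cases hkE : k ∈ E
  · rw [if_pos hkE, if_pos hkE]
  · rw [if_neg hkE, if_neg hkE]; exact h k hk hkE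

theorem patchE_patchE {E : List Nat} {a a' b : List Int} (hl : a'.length = a.length) :
    patchE E a' (patchE E a b) = patchE E a' b := by
  apply eq_of_getD (by simp [length_patchE])
  intro k hk
  rw [length_patchE] at hk
  rw [getD_patchE E a' _ hk, getD_patchE E a' b hk]
  by_cases hkE : k ∈ E
  · rw [if_pos hkE, if_pos hkE, getD_patchE E a b (by omega), if_pos hkE]
  · rw [if_neg hkE, if_neg hkE]

theorem patchE_eq_right {E : List Nat} {a b : List Int} (hl : a.length = b.length)
    (h : ∀ k, k < a.length → k ∉ E → a.getD k 0 = b.getD k 0) :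
    patchE E a b = b := by
  apply eq_of_getD (by simp [length_patchE, hl])
  intro k hk
  rw [length_patchE] at hk
  rw [getD_patchE E a b hk]
  by_cases hkE : k ∈ E
  · rw [if_pos hkE]
  · rw [if_neg hkE]; exact h k hk hkE

-- ---- length preservation ----
theorem lenLoop (d : List Int) (rec : Int → List Int → Option (Int × List Int)) (n : Int)
    (hrec : ∀ c s v s', rec c s = some (v, s') → s'.length = s.length) :
    ∀ t dp dp2, loopA d rec n t dp = some dp2 → dp2.length = dp.length := by
  intro t
  induction t with
  | nil =>
    intro dp dp2 h
    rw [loopA] at h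
    cases h
    rfl
  | cons e t ih =>
    intro dp dp2 h
    rw [loopA] at h
    cases h1 : PySem.List.pyGet? d n with
    | none => cases h2 : PySem.List.pyGet? d e.1 <;> simp [h1, h2] at h
    | some dn =>
      cases h2 : PySem.List.pyGet? d e.1 with
      | none => simp [h1, h2] at h
      | some dnxt =>
        simp only [h1, h2] at h
        split_ifs at h with hg
        · cases hr : rec e.1 dp with
          | none => simp [hr] at h
          | some p =>
            obtain ⟨v, dp'⟩ := p
            simp only [hr] at h
            cases h3 : PySem.List.pyGet? dp' n with
            | none => simp [h3] at h
            | some cur =>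
              simp only [h3] at h
              cases h4 : PySem.List.pySet? dp' n (cur + v) with
              | none => simp [h4] at h
              | some dp'' =>
                simp only [h4] at h
                have l1 := hrec _ _ _ _ hr
                obtain ⟨k, _, _, hset⟩ := pySet?_some_inv h4
                have := ih _ _ h
                simp [this, hset, l1]
        · exact ih _ _ h

theorem lenA (g : List (List (Int × Int))) (d : List Int) :
    ∀ f n dp v dp', recA g d f n dp = some (v, dp') → dp'.length = dp.length := by
  intro f
  induction f with
  | zero => intro n dp v dp' h; rw [recA] at h; cases h
  | succ f ih =>
    intro n dp v dp' h
    rw [recA] at h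
    split_ifs at h with h2
    · cases h; rfl
    · cases h1 : PySem.List.pyGet? dp n with
      | none => simp [h1] at h
      | some v0 =>
        simp only [h1] at h
        split_ifs at h with hm
        · cases h; rfl
        · cases hz : PySem.List.pySet? dp n 0 with
          | none => simp [hz] at h
          | some dpz =>
            simp only [hz] at h
            cases ha : PySem.List.pyGet? g n with
            | none => simp [ha] at h
            | some adj =>
              simp only [ha] at h
              cases hl : loopA d (fun c s => recA g d f c s) n adj dpz with
              | none => simp [hl] at h
              | some dp2 =>
                simp only [hl] at h
                cases h5 : PySem.List.pyGet? dp2 n with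
                | none => simp [h5] at h
                | some r =>
                  simp only [h5] at h
                  cases h
                  have hzl : dpz.length = dp.length := by
                    obtain ⟨k, _, _, hset⟩ := pySet?_some_inv hz
                    simp [hset]
                  have := lenLoop d _ n (fun c s v s' hcs => ih c s v s' hcs) adj dpz dp' hl
                  omega

-- ---- stability of A's recursion: entries stay ≥ -1, non-(-1) entries are never
-- rewritten, the returned value is ≥ 0 and (for n ≠ 2) is stored at n's entry ----
theorem stabLoop (d : List Int) (rec : Int → List Int → Option (Int × List Int)) (n : Int) (jn : Nat)
    (hlen : ∀ c s v s', rec c s = some (v, s') → s'.length = s.length)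
    (hstab : ∀ c s v s', rec c s = some (v, s') → (∀ k, k < s.length → -1 ≤ s.getD k 0) →
      (∀ k, k < s.length → -1 ≤ s'.getD k 0) ∧
      (∀ k, k < s.length → s.getD k 0 ≠ -1 → s'.getD k 0 = s.getD k 0) ∧ 0 ≤ v) :
    ∀ t dp dp2, loopA d rec n t dp = some dp2 →
      PySem.List.pyIdx? dp.length n = some jn →
      (∀ k, k < dp.length → -1 ≤ dp.getD k 0) →
      0 ≤ dp.getD jn 0 →
      ((∀ k, k < dp.length → -1 ≤ dp2.getD k 0) ∧
       (∀ k, k < dp.length → k ≠ jn → dp.getD k 0 ≠ -1 → dp2.getD k 0 = dp.getD k 0) ∧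
       0 ≤ dp2.getD jn 0) := by
  intro t
  induction t with
  | nil =>
    intro dp dp2 h hjn hge hnn
    rw [loopA] at h
    cases h
    exact ⟨hge, fun k _ _ _ => rfl, hnn⟩
  | cons e t ih =>
    intro dp dp2 h hjn hge hnn
    have hjnlt : jn < dp.length := pyIdx?_lt hjn
    rw [loopA] at h
    cases h1 : PySem.List.pyGet? d n with
    | none => cases h2 : PySem.List.pyGet? d e.1 <;> simp [h1, h2] at h
    | some dn =>
      cases h2 : PySem.List.pyGet? d e.1 with
      | none => simp [h1, h2] at h
      | some dnxt =>
        simp only [h1, h2] at h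
        split_ifs at h with hg
        · cases hr : rec e.1 dp with
          | none => simp [hr] at h
          | some p =>
            obtain ⟨v, dp'⟩ := p
            simp only [hr] at h
            cases h3 : PySem.List.pyGet? dp' n with
            | none => simp [h3] at h
            | some cur =>
              simp only [h3] at h
              cases h4 : PySem.List.pySet? dp' n (cur + v) with
              | none => simp [h4] at h
              | some dp'' =>
                simp only [h4] at h
                have l1 : dp'.length = dp.length := hlen _ _ _ _ hr
                obtain ⟨hge', hpres', hv⟩ := hstab _ _ _ _ hr hge
                -- cur is the old value at jn
                obtain ⟨k3, hk3, hk3lt, hcur⟩ := pyGet?_some_inv 0 h3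
                rw [l1] at hk3
                rw [hjn] at hk3
                cases hk3
                have hcur0 : cur = dp.getD jn 0 := by
                  rw [hcur]
                  exact hpres' jn hjnlt (by omega)
                obtain ⟨k4, hk4, _, hset⟩ := pySet?_some_inv h4
                rw [l1, hjn] at hk4
                cases hk4
                subst hset
                have l2 : (dp'.set jn (cur + v)).length = dp.length := by simp [l1]
                have hjn'' : PySem.List.pyIdx? (dp'.set jn (cur + v)).length n = some jn := by
                  rw [l2]; exact hjn
                have hge'' : ∀ k, k < (dp'.set jn (cur + v)).length → -1 ≤ (dp'.set jn (cur + v)).getD k 0 := by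
                  intro k hk
                  rw [l2] at hk
                  by_cases hkj : k = jn
                  · subst hkj
                    rw [getD_set_self _ (by omega)]
                    omega
                  · rw [getD_set_ne _ hkj]
                    exact hge' k hk
                have hnn'' : 0 ≤ (dp'.set jn (cur + v)).getD jn 0 := by
                  rw [getD_set_self _ (by omega)]
                  omega
                obtain ⟨ge2, pres2, nn2⟩ := ih _ _ h hjn'' hge'' hnn''
                rw [l2] at ge2 pres2
                refine ⟨ge2, ?_, nn2⟩
                intro k hk hkj hkne
                have e1 : (dp'.set jn (cur + v)).getD k 0 = dp.getD k 0 := by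
                  rw [getD_set_ne _ hkj]
                  exact hpres' k hk hkne
                rw [pres2 k hk hkj (by rw [e1]; exact hkne), e1]
        · exact ih _ _ h hjn hge hnn

theorem stabA (g : List (List (Int × Int))) (d : List Int) :
    ∀ f n dp v dp', recA g d f n dp = some (v, dp') →
      (∀ k, k < dp.length → -1 ≤ dp.getD k 0) →
      ((∀ k, k < dp.length → -1 ≤ dp'.getD k 0) ∧
       (∀ k, k < dp.length → dp.getD k 0 ≠ -1 → dp'.getD k 0 = dp.getD k 0) ∧
       0 ≤ v ∧
       (n ≠ 2 → ∀ jx, PySem.List.pyIdx? dp.length n = some jx → dp'.getD jx 0 = v)) := by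
  intro f
  induction f with
  | zero => intro n dp v dp' h; rw [recA] at h; cases h
  | succ f ih =>
    intro n dp v dp' h hge
    rw [recA] at h
    split_ifs at h with h2
    · cases h
      exact ⟨hge, fun _ _ _ => rfl, by omega, fun hn => absurd h2 hn⟩
    · cases h1 : PySem.List.pyGet? dp n with
      | none => simp [h1] at h
      | some v0 =>
        obtain ⟨jx, hjx, hjxlt, hv0⟩ := pyGet?_some_inv 0 h1
        simp only [h1] at h
        split_ifs at h with hm
        · cases h
          refine ⟨hge, fun _ _ _ => rfl, ?_, ?_⟩
          · have := hge jx hjxlt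
            omega
          · intro _ jx' hjx'
            rw [hjx] at hjx'
            cases hjx'
            omega
        · rw [not_not] at hm
          cases hz : PySem.List.pySet? dp n 0 with
          | none => simp [hz] at h
          | some dpz =>
            simp only [hz] at h
            cases ha : PySem.List.pyGet? g n with
            | none => simp [ha] at h
            | some adj =>
              simp only [ha] at h
              cases hl : loopA d (fun c s => recA g d f c s) n adj dpz with
              | none => simp [hl] at h
              | some dp2 =>
                simp only [hl] at h
                cases h5 : PySem.List.pyGet? dp2 n with
                | none => simp [h5] at h
                | some r =>
                  simp only [h5] at h
                  cases h
                  obtain ⟨kz, hkz, _, hsetz⟩ := pySet?_some_inv hz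
                  rw [hjx] at hkz
                  cases hkz
                  subst hsetz
                  have lz : (dp.set jx 0).length = dp.length := by simp
                  have l2 : dp'.length = dp.length := by
                    have := lenLoop d _ n (fun c s v s' hcs => lenA g d f c s v s' hcs) adj _ _ hl
                    omega
                  have hjz : PySem.List.pyIdx? (dp.set jx 0).length n = some jx := by
                    rw [lz]; exact hjx
                  have hgez : ∀ k, k < (dp.set jx 0).length → -1 ≤ (dp.set jx 0).getD k 0 := by
                    intro k hk
                    rw [lz] at hk
                    by_cases hkj : k = jx
                    · subst hkj; rw [getD_set_self _ (by omega)]; omega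
                    · rw [getD_set_ne _ hkj]; exact hge k hk
                  have hnnz : 0 ≤ (dp.set jx 0).getD jx 0 := by
                    rw [getD_set_self _ (by omega)]
                  obtain ⟨ge2, pres2, nn2⟩ := stabLoop d _ n jx
                    (fun c s v s' hcs => lenA g d f c s v s' hcs)
                    (fun c s v s' hcs hges => by
                      obtain ⟨a, b, c', _⟩ := ih c s v s' hcs hges
                      exact ⟨a, b, c'⟩)
                    adj _ _ hl hjz hgez hnnz
                  rw [lz] at ge2 pres2
                  obtain ⟨k5, hk5, _, hr5⟩ := pyGet?_some_inv 0 h5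
                  rw [l2, hjx] at hk5
                  cases hk5
                  refine ⟨ge2, ?_, ?_, ?_⟩
                  · intro k hk hkne
                    by_cases hkj : k = jx
                    · subst hkj; rw [hv0] at hm; exact absurd hm hkne
                    · have e1 : (dp.set jx 0).getD k 0 = dp.getD k 0 := getD_set_ne _ hkj
                      rw [pres2 k hk hkj (by rw [e1]; exact hkne), e1]
                  · rw [hr5]; exact nn2
                  · intro _ jx' hjx'
                    rw [hjx] at hjx'
                    cases hjx'
                    omega

-- ---- fuel sufficiency for A's port ----
def rankV (d : List Int) (a : Int) : Nat := ((d.toFinset).filter (fun v => v < a)).card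

theorem rankV_lt {d : List Int} {a b : Int} (ha : a ∈ d) (hab : a < b) : rankV d a < rankV d b := by
  apply Finset.card_lt_card
  constructor
  · intro v hv
    simp only [Finset.mem_filter] at hv ⊢
    exact ⟨hv.1, by omega⟩
  · intro hsub
    have hmem : a ∈ (d.toFinset).filter (fun v => v < b) := by
      simp only [Finset.mem_filter, List.mem_toFinset]
      exact ⟨ha, hab⟩
    have := hsub hmem
    simp only [Finset.mem_filter] at this
    omega

theorem rankV_le_len (d : List Int) (a : Int) : rankV d a ≤ d.length := by
  calc rankV d a ≤ d.toFinset.card := Finset.card_filter_le _ _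
  _ ≤ d.length := d.toFinset_card_le

theorem pyIdx?_some_of_InRange {n : Nat} {i : Int} (h : PySem.Raise.InRange n i) :
    ∃ k, PySem.List.pyIdx? n i = some k := by
  obtain ⟨h1, h2⟩ := h
  unfold PySem.List.pyIdx?
  split_ifs <;> simp_all

theorem fuelLoop (g : List (List (Int × Int))) (d : List Int) (rec : Int → List Int → Option (Int × List Int)) (n : Int)
    (hlen : ∀ c s v s', rec c s = some (v, s') → s'.length = s.length)
    (hrec : ∀ c s dc dnv, s.length = d.length → (c = 2 ∨ PySem.Raise.InRange d.length c) →
      PySem.List.pyGet? d c = some dc → PySem.List.pyGet? d n = some dnv → dc < dnv →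
      (rec c s).isSome) :
    ∀ t dp, dp.length = d.length → PySem.Raise.InRange d.length n →
      (∀ e ∈ t, PySem.Raise.InRange d.length e.1) →
      (loopA d rec n t dp).isSome := by
  intro t
  induction t with
  | nil => intro dp _ _ _; rw [loopA]; simp
  | cons e t ih =>
    intro dp hdp hn ht
    obtain ⟨jn, hjn⟩ := pyIdx?_some_of_InRange hn
    have hdn : PySem.List.pyGet? d n = some (d.getD jn 0) := pyGet?_some_getD 0 hjn
    have he : PySem.Raise.InRange d.length e.1 := ht e (by simp)
    obtain ⟨je, hje⟩ := pyIdx?_some_of_InRange he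
    have hdnxt : PySem.List.pyGet? d e.1 = some (d.getD je 0) := pyGet?_some_getD 0 hje
    rw [loopA]
    rw [hdn, hdnxt]
    simp only []
    split_ifs with hg
    · have hsome := hrec e.1 dp (d.getD je 0) (d.getD jn 0) hdp (Or.inr he) hdnxt hdn hg
      cases hr : rec e.1 dp with
      | none => rw [hr] at hsome; cases hsome
      | some p =>
        obtain ⟨v, dp'⟩ := p
        have hdp' : dp'.length = d.length := by rw [hlen _ _ _ _ hr]; exact hdp
        have hjn' : PySem.List.pyIdx? dp'.length n = some jn := by
          rw [hdp', ← hdp]; rw [hdp]; exact hjn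
        have hcur : PySem.List.pyGet? dp' n = some (dp'.getD jn 0) := pyGet?_some_getD 0 hjn'
        have hset : PySem.List.pySet? dp' n (dp'.getD jn 0 + v) = some (dp'.set jn (dp'.getD jn 0 + v)) :=
          pySet?_some _ hjn'
        simp only [hcur, hset]
        exact ih _ (by simp [hdp']) hn (fun e' he' => ht e' (by simp [he']))
    · exact ih _ hdp hn (fun e' he' => ht e' (by simp [he']))

theorem fuelA (g : List (List (Int × Int))) (d : List Int) :
    ∀ f n dp, g.length = d.length → dp.length = d.length →
      (∀ adj ∈ g, ∀ e ∈ adj, PySem.Raise.InRange d.length e.1) →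
      (n = 2 ∨ PySem.Raise.InRange d.length n) →
      1 ≤ f →
      (∀ dn, PySem.List.pyGet? d n = some dn → rankV d dn < f) →
      (recA g d f n dp).isSome := by
  intro f
  induction f with
  | zero => intro n dp _ _ _ _ h1 _; omega
  | succ f ih =>
    intro n dp hg hdp hedge hn _ hrank
    rw [recA]
    by_cases h2 : n = 2
    · simp [h2]
    · rw [if_neg h2]
      have hnr : PySem.Raise.InRange d.length n := by
        rcases hn with hn | hn
        · exact absurd hn h2
        · exact hn
      obtain ⟨jx, hjx⟩ := pyIdx?_some_of_InRange hnr
      have hjdp : PySem.List.pyIdx? dp.length n = some jx := by rw [hdp]; exact hjx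
      have hread : PySem.List.pyGet? dp n = some (dp.getD jx 0) := pyGet?_some_getD 0 hjdp
      rw [hread]
      simp only []
      split_ifs with hm
      · simp
      · have hsetz : PySem.List.pySet? dp n 0 = some (dp.set jx 0) := pySet?_some _ hjdp
        have hjg : PySem.List.pyIdx? g.length n = some jx := by rw [hg]; exact hjx
        have hadj : PySem.List.pyGet? g n = some (g.getD jx []) := pyGet?_some_getD [] hjg
        have hloop : (loopA d (fun c s => recA g d f c s) n (g.getD jx []) (dp.set jx 0)).isSome := by
          apply fuelLoop g d _ n (fun c s v s' hcs => lenA g d f c s v s' hcs)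
          · intro c s dc dnv hslen hc hdc hdnv hlt
            apply ih c s hg hslen hedge hc
            · have hdmem : dc ∈ d := PySem.List.mem_of_pyGet?_eq_some d hdc
              have r1 : rankV d dc < rankV d dnv := rankV_lt hdmem hlt
              have r2 : rankV d dnv < f + 1 := hrank dnv hdnv
              omega
            · intro dn' hdn'
              rw [hdc] at hdn'
              cases hdn'
              have hdmem : dc ∈ d := PySem.List.mem_of_pyGet?_eq_some d hdc
              have r1 : rankV d dc < rankV d dnv := rankV_lt hdmem hlt
              have r2 : rankV d dnv < f + 1 := hrank dnv hdnv
              omega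
          · simp [hdp]
          · exact hnr
          · intro e he
            have hjxg : jx < g.length := pyIdx?_lt hjg
            have hadjmem : g.getD jx [] ∈ g := by
              rw [List.getD_eq_getElem?_getD, List.getElem?_eq_getElem hjxg]
              simp
            exact hedge _ hadjmem e he
        cases hl : loopA d (fun c s => recA g d f c s) n (g.getD jx []) (dp.set jx 0) with
        | none => rw [hl] at hloop; cases hloop
        | some dp2 =>
          have hdp2 : dp2.length = dp.length := by
            have := lenLoop d _ n (fun c s v s' hcs => lenA g d f c s v s' hcs) _ _ _ hl
            simp at this
            omega
          have hjdp2 : PySem.List.pyIdx? dp2.length n = some jx := by rw [hdp2]; exact hjdp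
          have hr2 : PySem.List.pyGet? dp2 n = some (dp2.getD jx 0) := pyGet?_some_getD 0 hjdp2
          simp only [hsetz, hadj, hl, hr2]
          simp

-- ---- fuel monotonicity for B's machine ----
theorem monoB (g : List (List (Int × Int))) (d : List Int) :
    ∀ F s dp r, runB g d F s dp = some r → runB g d (F + 1) s dp = some r := by
  intro F
  induction F with
  | zero => intro s dp r h; rw [runB] at h; cases h
  | succ F ih =>
    intro s dp r h
    match s with
    | [] =>
      rw [runB] at h ⊢
      exact h
    | (n, ready) :: rest =>
      rw [runB] at h ⊢
      split_ifs at h ⊢ with h1 h2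
      · cases ha : PySem.List.pyGet? g n with
        | none => simp [ha] at h
        | some adj =>
          simp only [ha] at h ⊢
          cases hs : sumQ d dp n adj 0 with
          | none => simp [hs] at h
          | some total =>
            simp only [hs] at h ⊢
            cases hset : PySem.List.pySet? dp n total with
            | none => simp [hset] at h
            | some dp' =>
              simp only [hset] at h ⊢
              exact ih _ _ _ h
      · exact ih _ _ _ h
      · cases h1' : PySem.List.pyGet? dp n with
        | none => simp [h1'] at h
        | some v =>
          simp only [h1'] at h ⊢
          split_ifs at h ⊢ with h3
          · cases ha : PySem.List.pyGet? g n with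
            | none => simp [ha] at h
            | some adj =>
              simp only [ha] at h ⊢
              cases hq : pushQ d n adj with
              | none => simp [hq] at h
              | some qs =>
                simp only [hq] at h ⊢
                exact ih _ _ _ h
          · exact ih _ _ _ h

theorem monoB_le (g : List (List (Int × Int))) (d : List Int) {F F' : Nat} (h : F ≤ F') :
    ∀ s dp r, runB g d F s dp = some r → runB g d F' s dp = some r := by
  induction F' with
  | zero =>
    intro s dp r hr
    have : F = 0 := by omega
    subst this
    exact hr
  | succ F' ih =>
    intro s dp r hr
    by_cases hF : F = F' + 1
    · subst hF; exact hr
    · exact monoB g d F' s dp r (ih (by omega) s dp r hr)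

-- ---- the simulation: B's machine executes A's recursion ----
def SimStmt (g : List (List (Int × Int))) (d : List Int) (W f : Nat) : Prop :=
  ∀ (x : Int) (dpA dpM : List Int) (E : List Nat) (v : Int) (dpA' : List Int),
    recA g d f x dpA = some (v, dpA') →
    dpA.length = d.length →
    dpM.length = dpA.length →
    (∀ k, k < dpA.length → -1 ≤ dpA.getD k 0) →
    (∀ k ∈ E, k < dpM.length ∧ ∀ dxv, PySem.List.pyGet? d x = some dxv → dxv < d.getD k 0) →
    (∀ k, k < dpA.length → k ∉ E → dpA.getD k 0 = dpM.getD k 0) →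
    ∀ (rest : List (Int × Bool)) (F : Nat) (r : List Int),
      runB g d F rest (patchE E dpA' dpM) = some r →
      runB g d (F + costB W f) ((x, false) :: rest) dpM = some r

theorem simLoop (g : List (List (Int × Int))) (d : List Int) (f W : Nat)
    (IH : SimStmt g d W f)
    (x : Int) (jx : Nat) (E : List Nat) (dpM : List Int)
    (hjx : PySem.List.pyIdx? d.length x = some jx)
    (hE : ∀ k ∈ E, k < dpM.length ∧ ∀ dxv, PySem.List.pyGet? d x = some dxv → dxv < d.getD k 0)
    (hjxE : jx ∉ E)
    (hlMd : dpM.length = d.length) :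
    ∀ t dpc dp2, loopA d (fun c s => recA g d f c s) x t dpc = some dp2 →
      dpc.length = d.length →
      (∀ k, k < dpc.length → -1 ≤ dpc.getD k 0) →
      0 ≤ dpc.getD jx 0 →
      ((∃ qs, pushQ d x t = some qs ∧
          ∀ F r rest, runB g d F ((x, true) :: rest) (patchE (jx :: E) dp2 dpM) = some r →
            runB g d (F + t.length * costB W f) (qs ++ (x, true) :: rest) (patchE (jx :: E) dpc dpM) = some r) ∧
       (∀ acc, sumQ d (patchE (jx :: E) dp2 dpM) x t acc = some (acc + (dp2.getD jx 0 - dpc.getD jx 0)))) := by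
  have hjxlt : jx < d.length := pyIdx?_lt hjx
  have hdn : PySem.List.pyGet? d x = some (d.getD jx 0) := pyGet?_some_getD 0 hjx
  intro t
  induction t with
  | nil =>
    intro dpc dp2 h _ _ _
    rw [loopA] at h
    cases h
    refine ⟨⟨[], by rw [pushQ], ?_⟩, ?_⟩
    · intro F r rest hF
      simpa using hF
    · intro acc
      rw [sumQ]
      simp
  | cons e t ih =>
    intro dpc dp2 h hlc hge hnn
    have hjc : PySem.List.pyIdx? dpc.length x = some jx := by rw [hlc]; exact hjx
    rw [loopA] at h
    rw [hdn] at h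
    cases h2 : PySem.List.pyGet? d e.1 with
    | none => simp [h2] at h
    | some dnxt =>
      simp only [h2] at h
      obtain ⟨jc, hjcd, hjclt, hdnxtv⟩ := pyGet?_some_inv 0 h2
      split_ifs at h with hg
      · -- qualifying successor
        cases hr : recA g d f e.1 dpc with
        | none => simp [hr] at h
        | some p =>
          obtain ⟨vc, dpc'⟩ := p
          simp only [hr] at h
          have lc' : dpc'.length = dpc.length := lenA g d f _ _ _ _ hr
          have hjc' : PySem.List.pyIdx? dpc'.length x = some jx := by rw [lc']; exact hjc
          cases h3 : PySem.List.pyGet? dpc' x with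
          | none => simp [h3] at h
          | some cur =>
            simp only [h3] at h
            obtain ⟨k3, hk3, _, hcur⟩ := pyGet?_some_inv 0 h3
            rw [hjc'] at hk3
            cases hk3
            cases h4 : PySem.List.pySet? dpc' x (cur + vc) with
            | none => simp [h4] at h
            | some dpc2 =>
              simp only [h4] at h
              obtain ⟨k4, hk4, _, hset4⟩ := pySet?_some_inv h4
              rw [hjc'] at hk4
              cases hk4
              subst hset4
              obtain ⟨ge', pres', hvc, post'⟩ := stabA g d f e.1 dpc vc dpc' hr hge
              have hcur0 : cur = dpc.getD jx 0 := by
                rw [hcur]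
                exact pres' jx (by omega) (by omega)
              have l2c : (dpc'.set jx (cur + vc)).length = dpc.length := by simp [lc']
              have hjc2 : PySem.List.pyIdx? (dpc'.set jx (cur + vc)).length x = some jx := by
                rw [l2c]; exact hjc
              have hge2 : ∀ k, k < (dpc'.set jx (cur + vc)).length → -1 ≤ (dpc'.set jx (cur + vc)).getD k 0 := by
                intro k hk
                rw [l2c] at hk
                by_cases hkj : k = jx
                · subst hkj; rw [getD_set_self _ (by omega)]; omega
                · rw [getD_set_ne _ hkj]; exact ge' k hk
              have hnn2 : 0 ≤ (dpc'.set jx (cur + vc)).getD jx 0 := by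
                rw [getD_set_self _ (by omega)]; omega
              obtain ⟨⟨qs', hqs', hstack'⟩, hsum'⟩ := ih _ _ h (by omega) hge2 hnn2
              have hdp2len : dp2.length = dpc.length := by
                have := lenLoop d _ x (fun c s v s' hcs => lenA g d f c s v s' hcs) _ _ _ h
                omega
              -- the written value at jx after this iteration
              have hdpc2jx : (dpc'.set jx (cur + vc)).getD jx 0 = cur + vc := getD_set_self _ (by omega)
              -- index facts for the successor's entry
              have hjcnejx : jc ≠ jx := by
                intro hh
                rw [hh] at hdnxtv
                omega
              have hjcnotE : jc ∉ E := by
                intro hh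
                have := (hE jc hh).2 (d.getD jx 0) hdn
                omega
              refine ⟨⟨(e.1, false) :: qs', ?_, ?_⟩, ?_⟩
              · rw [pushQ]
                rw [hdn, h2]
                simp only [hqs']
                rw [if_pos hg]
              · -- stack simulation
                intro F r rest hF
                have step1 := hstack' F r rest hF
                have epatch : patchE (jx :: E) (dpc'.set jx (cur + vc)) dpM = patchE (jx :: E) dpc' dpM := by
                  apply patchE_ext (by simp)
                  intro k hk hkE
                  have : k ≠ jx := fun hh => hkE (by simp [hh])
                  rw [getD_set_ne _ this]
                rw [epatch] at step1
                have hmc : (patchE (jx :: E) dpc dpM).length = dpc.length := length_patchE _ _ _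
                have hE' : ∀ k ∈ jx :: E, k < (patchE (jx :: E) dpc dpM).length ∧
                    ∀ dcv, PySem.List.pyGet? d e.1 = some dcv → dcv < d.getD k 0 := by
                  intro k hk
                  rw [List.mem_cons] at hk
                  rcases hk with hk | hk
                  · subst hk
                    refine ⟨by omega, ?_⟩
                    intro dcv hdcv
                    rw [h2] at hdcv
                    cases hdcv
                    omega
                  · obtain ⟨hk1, hk2⟩ := hE k hk
                    refine ⟨by omega, ?_⟩
                    intro dcv hdcv
                    rw [h2] at hdcv
                    cases hdcv
                    have := hk2 (d.getD jx 0) hdn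
                    omega
                have hagree' : ∀ k, k < dpc.length → k ∉ jx :: E → dpc.getD k 0 = (patchE (jx :: E) dpc dpM).getD k 0 := by
                  intro k hk hkE
                  rw [getD_patchE _ _ _ hk, if_neg hkE]
                have step2 := IH e.1 dpc (patchE (jx :: E) dpc dpM) (jx :: E) vc dpc' hr (by omega)
                  (by omega) hge hE' hagree' (qs' ++ (x, true) :: rest) (F + t.length * costB W f) r
                  (by rw [patchE_patchE (by omega)]; exact step1)
                rw [List.cons_append]
                have harith : F + (e :: t).length * costB W f = F + t.length * costB W f + costB W f := by
                  simp [Nat.succ_mul]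
                  ring
                rw [harith]
                exact step2
              · -- the summation over this suffix
                intro acc
                rw [sumQ]
                rw [hdn, h2]
                simp only []
                rw [if_pos hg]
                by_cases h2c : e.1 = 2
                · rw [if_pos h2c]
                  -- a call on node 2 returns 1 and leaves dp unchanged
                  have hvc1 : vc = 1 ∧ dpc' = dpc := by
                    cases f with
                    | zero => rw [recA] at hr; cases hr
                    | succ f' =>
                      rw [recA] at hr
                      rw [if_pos h2c] at hr
                      cases hr
                      exact ⟨rfl, rfl⟩
                  obtain ⟨hvc1, _⟩ := hvc1
                  rw [hsum' (acc + 1)]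
                  congr 1
                  rw [hdpc2jx]
                  omega
                · rw [if_neg h2c]
                  -- the machine reads the successor's final dp value, which is vc
                  have hjcp : PySem.List.pyIdx? (patchE (jx :: E) dp2 dpM).length e.1 = some jc := by
                    rw [length_patchE]
                    rw [hdp2len, hlc]
                    exact hjcd
                  have hreadc : PySem.List.pyGet? (patchE (jx :: E) dp2 dpM) e.1 =
                      some ((patchE (jx :: E) dp2 dpM).getD jc 0) := pyGet?_some_getD 0 hjcp
                  rw [hreadc]
                  simp only []
                  have hjclt2 : jc < dp2.length := by omega
                  have hpv : (patchE (jx :: E) dp2 dpM).getD jc 0 = dp2.getD jc 0 := by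
                    rw [getD_patchE _ _ _ hjclt2]
                    rw [if_neg]
                    intro hh
                    rw [List.mem_cons] at hh
                    rcases hh with hh | hh
                    · exact hjcnejx hh
                    · exact hjcnotE hh
                  have hjcc : PySem.List.pyIdx? dpc.length e.1 = some jc := by rw [hlc]; exact hjcd
                  have hvcstored : dpc'.getD jc 0 = vc := post' h2c jc hjcc
                  have hvc2 : (dpc'.set jx (cur + vc)).getD jc 0 = vc := by
                    rw [getD_set_ne _ hjcnejx]
                    exact hvcstored
                  -- preserved by the rest of the loop
                  obtain ⟨_, presL, _⟩ := stabLoop d _ x jx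
                    (fun c s v s' hcs => lenA g d f c s v s' hcs)
                    (fun c s v s' hcs hges => by
                      obtain ⟨a, b, c', _⟩ := stabA g d f c s v s' hcs hges
                      exact ⟨a, b, c'⟩)
                    t _ _ h hjc2 hge2 hnn2
                  have hdp2jc : dp2.getD jc 0 = vc := by
                    rw [presL jc (by omega) hjcnejx (by rw [hvc2]; omega)]
                    exact hvc2
                  rw [hpv, hdp2jc]
                  rw [hsum' (acc + vc)]
                  congr 1
                  rw [hdpc2jx]
                  omega
      · -- non-qualifying successor
        obtain ⟨⟨qs', hqs', hstack'⟩, hsum'⟩ := ih _ _ h hlc hge hnn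
        refine ⟨⟨qs', ?_, ?_⟩, ?_⟩
        · rw [pushQ]
          rw [hdn, h2]
          simp only [hqs']
          rw [if_neg hg]
        · intro F r rest hF
          have := hstack' F r rest hF
          apply monoB_le g d (F' := F + (e :: t).length * costB W f) (by simp only [List.length_cons, Nat.succ_mul]; omega) _ _ _ this
        · intro acc
          rw [sumQ]
          rw [hdn, h2]
          simp only []
          rw [if_neg hg]
          exact hsum' acc

theorem simB (g : List (List (Int × Int))) (d : List Int) (W : Nat)
    (hW : ∀ adj ∈ g, adj.length ≤ W) : ∀ f, SimStmt g d W f := by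
  intro f
  induction f with
  | zero =>
    intro x dpA dpM E v dpA' hA
    rw [recA] at hA
    cases hA
  | succ f ihf =>
    intro x dpA dpM E v dpA' hA hld hlen hge hE hagree rest F r hF
    have hcb : costB W (f + 1) = 2 + W * costB W f := rfl
    rw [recA] at hA
    split_ifs at hA with h2
    · -- the node is 2: A returns 1 without touching dp; the machine skips the frame
      cases hA
      subst h2
      have hpm : patchE E dpA dpM = dpM := patchE_eq_right (by omega) hagree
      rw [hpm] at hF
      have harith : F + costB W (f + 1) = (F + 1 + W * costB W f) + 1 := by
        rw [hcb]; ring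
      rw [harith, runB]
      simp only [Bool.false_eq_true, if_false]
      exact monoB_le g d (by omega) _ _ _ hF
    · cases h1 : PySem.List.pyGet? dpA x with
      | none => simp [h1] at hA
      | some v0 =>
        obtain ⟨jx, hjx0, hjxlt, hv0⟩ := pyGet?_some_inv 0 h1
        have hjxd : PySem.List.pyIdx? d.length x = some jx := by rw [← hld]; exact hjx0
        have hjxE : jx ∉ E := by
          intro hh
          have := (hE jx hh).2 (d.getD jx 0) (pyGet?_some_getD 0 hjxd)
          omega
        have hjxM : PySem.List.pyIdx? dpM.length x = some jx := by rw [hlen]; exact hjx0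
        have hreadM : PySem.List.pyGet? dpM x = some (dpM.getD jx 0) := pyGet?_some_getD 0 hjxM
        have hMA : dpM.getD jx 0 = dpA.getD jx 0 := (hagree jx (by omega) hjxE).symm
        simp only [h1] at hA
        split_ifs at hA with hm
        · -- memo hit: A returns dp[x] unchanged; the machine skips the frame
          cases hA
          have hpm : patchE E dpA dpM = dpM := patchE_eq_right (by omega) hagree
          rw [hpm] at hF
          have harith : F + costB W (f + 1) = (F + 1 + W * costB W f) + 1 := by
            rw [hcb]; ring
          rw [harith, runB]
          simp only [Bool.false_eq_true, if_false]
          rw [if_neg h2, hreadM]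
          simp only []
          rw [if_neg (by omega)]
          exact monoB_le g d (by omega) _ _ _ hF
        · -- compute: A zeroes dp[x] and loops; the machine opens the frame
          rw [not_not] at hm
          rw [pySet?_some (0 : Int) hjx0] at hA
          simp only [] at hA
          cases ha : PySem.List.pyGet? g x with
          | none => simp [ha] at hA
          | some adj =>
            simp only [ha] at hA
            cases hl : loopA d (fun c s => recA g d f c s) x adj (dpA.set jx 0) with
            | none => simp [hl] at hA
            | some dp2 =>
              simp only [hl] at hA
              cases h5 : PySem.List.pyGet? dp2 x with
              | none => simp [h5] at hA
              | some r5 =>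
                simp only [h5] at hA
                cases hA
                have hdpA'len : dpA'.length = dpA.length := by
                  have := lenLoop d _ x (fun c s v s' hcs => lenA g d f c s v s' hcs) _ _ _ hl
                  simp at this
                  omega
                obtain ⟨k5, hk5, _, hr5v⟩ := pyGet?_some_inv 0 h5
                rw [hdpA'len, hjx0] at hk5
                have hk5e : jx = k5 := Option.some_inj.mp hk5
                subst hk5e
                have hgeset : ∀ k, k < (dpA.set jx 0).length → -1 ≤ (dpA.set jx 0).getD k 0 := by
                  intro k hk
                  simp only [List.length_set] at hk
                  by_cases hkj : k = jx
                  · subst hkj; rw [getD_set_self _ (by omega)]; omega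
                  · rw [getD_set_ne _ hkj]; exact hge k hk
                have hnnset : 0 ≤ (dpA.set jx 0).getD jx 0 := by
                  rw [getD_set_self _ (by omega)]
                obtain ⟨⟨qs, hqs, hstack⟩, hsum⟩ := simLoop g d f W ihf x jx E dpM hjxd hE hjxE
                  (by omega) adj _ _ hl (by simp; omega) hgeset hnnset
                -- machine: open the frame
                have harith : F + costB W (f + 1) = (F + 1 + W * costB W f) + 1 := by
                  rw [hcb]; ring
                rw [harith, runB]
                simp only [Bool.false_eq_true, if_false]
                rw [if_neg h2, hreadM]
                simp only []
                rw [if_pos (by omega), ha]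
                simp only [hqs]
                -- the machine state equals the patched zeroed state
                have hpm : patchE (jx :: E) (dpA.set jx 0) dpM = dpM := by
                  apply patchE_eq_right (by simp; omega)
                  intro k hk hkE
                  simp only [List.length_set] at hk
                  have hkj : k ≠ jx := fun hh => hkE (by simp [hh])
                  rw [getD_set_ne _ hkj]
                  exact hagree k hk (fun hh => hkE (by simp [hh]))
                -- processing the (x, true) frame afterwards
                have hTrue : runB g d (F + 1) ((x, true) :: rest) (patchE (jx :: E) dpA' dpM) = some r := by
                  rw [runB]
                  rw [ha]
                  simp only []
                  rw [hsum 0]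
                  simp only []
                  have hjxp : PySem.List.pyIdx? (patchE (jx :: E) dpA' dpM).length x = some jx := by
                    rw [length_patchE, hdpA'len]
                    exact hjx0
                  rw [pySet?_some _ hjxp]
                  simp only []
                  have hfin : (patchE (jx :: E) dpA' dpM).set jx
                      (0 + (dpA'.getD jx 0 - (dpA.set jx 0).getD jx 0)) = patchE E dpA' dpM := by
                    apply eq_of_getD (by simp [length_patchE])
                    intro k hk
                    simp only [List.length_set, length_patchE] at hk
                    by_cases hkj : k = jx
                    · subst hkj
                      rw [getD_set_self _ (by rw [length_patchE]; omega)]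
                      rw [getD_patchE _ _ _ (by omega), if_neg hjxE]
                      rw [getD_set_self _ (by omega)]
                      omega
                    · rw [getD_set_ne _ hkj]
                      rw [getD_patchE _ _ _ hk, getD_patchE _ _ _ hk]
                      by_cases hkE : k ∈ E
                      · rw [if_pos (by simp [hkE]), if_pos hkE]
                      · rw [if_neg (by simp [hkj, hkE]), if_neg hkE]
                  rw [hfin]
                  exact hF
                have hrun := hstack (F + 1) r rest hTrue
                rw [hpm] at hrun
                apply monoB_le g d (F' := F + 1 + W * costB W f) ?_ _ _ _ hrun
                have hadjW : adj.length ≤ W := hW adj (PySem.List.mem_of_pyGet?_eq_some g ha)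
                have : adj.length * costB W f ≤ W * costB W f := Nat.mul_le_mul_right _ hadjW
                omega

theorem adjLen_le_flatten (g : List (List (Int × Int))) :
    ∀ adj ∈ g, adj.length ≤ g.flatten.length := by
  induction g with
  | nil => intro adj h; cases h
  | cons a g ih =>
    intro adj h
    rw [List.flatten_cons, List.length_append]
    rw [List.mem_cons] at h
    rcases h with h | h
    · subst h; omega
    · have := ih adj h
      omega

-- ===== VERDICT (by name: the statement is the Claim_ definition above) =====
theorem dfs_spec : Claim_equal_dfs := by
  unfold Claim_equal_dfs
  intro node graph dist dp _ hpre
  unfold Spec_dfs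
  by_cases h2 : node = 2
  · subst h2
    unfold dfs dfs_alt
    rw [recA]
    simp
  · rcases hpre with h | hmemo | hpre
    · exact absurd h h2
    · -- immediate memo hit: both sides return dp[node] untouched
      obtain ⟨hne, hnem⟩ := hmemo
      cases hv : PySem.List.pyGet? dp node with
      | none => exact absurd hv hne
      | some v =>
        have hvne : v ≠ -1 := fun hh => hnem (by rw [hv, hh])
        have hda : dfs node graph dist dp = v := by
          unfold dfs
          rw [recA, if_neg h2, hv]
          simp only []
          rw [if_pos hvne]
        have harith : 1 + costB graph.flatten.length (dist.length + 1) =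
            (1 + graph.flatten.length * costB graph.flatten.length dist.length) + 2 := by
          rw [show costB graph.flatten.length (dist.length + 1) =
            2 + graph.flatten.length * costB graph.flatten.length dist.length from rfl]
          ring
        unfold dfs_alt
        rw [if_neg h2, harith, runB]
        simp only [Bool.false_eq_true, if_false]
        rw [if_neg h2, hv]
        simp only []
        rw [if_neg (by omega), runB]
        rw [hda]
        show v = (PySem.List.pyGet? dp node).getD 0
        rw [hv]
        rfl
    obtain ⟨hge0, hgl, hdl, hnr, hedge⟩ := hpre
    have hge : ∀ k, k < dp.length → -1 ≤ dp.getD k 0 := fun k hk => hge0 _ (getD_mem hk)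
    have hrank : ∀ dn, PySem.List.pyGet? dist node = some dn → rankV dist dn < dist.length + 1 := by
      intro dn _
      have := rankV_le_len dist dn
      omega
    have hfuel := fuelA graph dist (dist.length + 1) node dp hgl hdl hedge (Or.inr hnr) (by omega) hrank
    cases hA : recA graph dist (dist.length + 1) node dp with
    | none => rw [hA] at hfuel; cases hfuel
    | some p =>
      obtain ⟨v, dp'⟩ := p
      obtain ⟨jx, hjx⟩ := pyIdx?_some_of_InRange hnr
      have hjxlt : jx < dist.length := pyIdx?_lt hjx
      have hdfs : dfs node graph dist dp = v := by unfold dfs; rw [hA]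
      have hF : runB graph dist 1 [] (patchE [] dp' dp) = some dp' := by
        rw [patchE_nil, runB]
      have hsim := simB graph dist graph.flatten.length (adjLen_le_flatten graph)
        (dist.length + 1) node dp dp [] v dp' hA hdl rfl hge
        (by intro k hk; cases hk) (fun k hk hkE => rfl) [] 1 dp' hF
      unfold dfs_alt
      rw [if_neg h2]
      rw [hsim]
      show dfs node graph dist dp = (PySem.List.pyGet? dp' node).getD 0
      have hdl' : dp'.length = dp.length := lenA graph dist _ _ _ _ _ hA
      have hjdp' : PySem.List.pyIdx? dp'.length node = some jx := by rw [hdl', hdl]; exact hjx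
      rw [pyGet?_some_getD 0 hjdp']
      obtain ⟨_, _, _, post⟩ := stabA graph dist (dist.length + 1) node dp v dp' hA hge
      have hpost := post h2 jx (by rw [hdl]; exact hjx)
      rw [hdfs, hpost]
      rfl
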